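-- pv_equiv track=rewrite | github.com/tu155/multi_project_shceduling | pro_pre_data.py | get_all_successors
-- ===== SOURCE A (Python) =====
-- def get_all_successors(activity, successors_dict):
--     """
--     获取指定活动之后的所有后续活动集合。
--
--     :param activity: 指定的活动
--     :param successors_dict: 紧后关系字典
--     :return: 一个集合，包含指定活动之后的所有后续活动
--     """
--     def dfs(current_activity):
--         # 将当前活动添加到结果集合中
--         result.add(current_activity)
--         # 遍历当前活动的紧后活动
--         for successor in successors_dict.get(current_activity, []):
--             # 如果紧后活动还没有被访问过，递归地继续搜索
--             if successor not in result:
--                 dfs(successor)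
--
--     result = set()  # 初始化结果集合
--     dfs(activity)  # 从指定活动开始深度优先搜索
--     return result
-- ===== SOURCE B (Python) =====
-- def get_all_successors(activity, successors_dict):
--     """Iterative DFS with an explicit stack instead of recursion (no recursion-depth limit)."""
--     result = set()
--     stack = [activity]
--     while stack:
--         node = stack.pop()
--         if node not in result:
--             result.add(node)
--             stack.extend(reversed(successors_dict.get(node, [])))
--     return result
-- ===== Notes on version B (the rewrite author's own statement) =====
-- stated objective: alternative
-- what changed: Replaced the recursive DFS closure (which can hit Python's recursion limit on long successor chains) with an iterative worklist DFS over an explicit stack, visiting nodes in the same order.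
import Mathlib
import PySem

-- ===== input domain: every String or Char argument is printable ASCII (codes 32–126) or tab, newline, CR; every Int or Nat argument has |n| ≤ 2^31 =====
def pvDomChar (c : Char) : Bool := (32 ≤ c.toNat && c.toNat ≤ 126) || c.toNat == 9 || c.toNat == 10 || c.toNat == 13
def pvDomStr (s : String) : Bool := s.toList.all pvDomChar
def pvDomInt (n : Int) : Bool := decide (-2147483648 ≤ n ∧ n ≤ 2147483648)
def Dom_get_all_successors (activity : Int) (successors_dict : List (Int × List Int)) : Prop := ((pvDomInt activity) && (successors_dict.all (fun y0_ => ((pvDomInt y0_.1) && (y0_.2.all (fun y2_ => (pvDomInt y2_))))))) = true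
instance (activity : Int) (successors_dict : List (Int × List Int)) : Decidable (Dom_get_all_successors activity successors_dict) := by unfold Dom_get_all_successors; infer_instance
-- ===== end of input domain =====

-- B replaces A's recursive DFS closure by an iterative explicit-stack DFS (same visit order, no recursion).

-- shared small helpers (used by both ports' fuel bounds; the fuel is only a totality guard)
def pvFlat (sd : List (Int × List Int)) : List Int := (sd.map Prod.snd).flatten
def pvSucc (sd : List (Int × List Int)) (n : Int) : List Int := PySem.Dict.getD (PySem.Dict.mk sd) n []
def pvU (a : Int) (sd : List (Int × List Int)) : List Int := a :: pvFlat sd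
def pvK (sd : List (Int × List Int)) : Nat := (pvFlat sd).length + 1

-- ===== PORT A =====
-- A's inner `dfs`: add the current activity to the result set, then recurse over its
-- unvisited successors.  The Nat fuel is a totality guard only: the recursion depth is
-- bounded by the number of distinct reachable nodes, so the fuel chosen below never runs out.
def pvDfsA (sd : List (Int × List Int)) : Nat → PySem.Set Int → Int → PySem.Set Int
  | 0, result, _ => result
  | f + 1, result, cur =>
    (pvSucc sd cur).foldl
      (fun acc s => if s ∈ acc then acc else pvDfsA sd f acc s)
      (PySem.Set.add result cur)

def get_all_successors (activity : Int) (successors_dict : List (Int × List Int)) : List Int :=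
  pvDfsA successors_dict ((pvU activity successors_dict).length + 1) PySem.Set.empty activity

-- ===== PORT B =====
-- B's while loop.  The stack is kept top-first (head = next pop), so Python's
-- `stack.extend(reversed(succ)); ... stack.pop()` is `succ ++ stack` here.
-- Fuel is again only a totality guard (each node pushes its successor list at most once).
def pvLoopB (sd : List (Int × List Int)) : Nat → PySem.Set Int → List Int → PySem.Set Int
  | 0, result, _ => result
  | _ + 1, result, [] => result
  | f + 1, result, n :: stack =>
    if n ∈ result then pvLoopB sd f result stack
    else pvLoopB sd f (PySem.Set.add result n) (pvSucc sd n ++ stack)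

def get_all_successors_alt (activity : Int) (successors_dict : List (Int × List Int)) : List Int :=
  pvLoopB successors_dict
    ((pvU activity successors_dict).length * pvK successors_dict + 1)
    PySem.Set.empty [activity]

-- ===== PRECONDITION & SPEC =====
def Spec_get_all_successors (activity : Int) (successors_dict : List (Int × List Int)) (out : List Int) : Prop := out = get_all_successors_alt activity successors_dict
instance (activity : Int) (successors_dict : List (Int × List Int)) (out : List Int) : Decidable (Spec_get_all_successors activity successors_dict out) := by unfold Spec_get_all_successors; infer_instance

-- ===== CLAIM (what is proved, stated in full; the proofs are below) =====
def Claim_equal_get_all_successors : Prop := ∀ (activity : Int) (successors_dict : List (Int × List Int)), Dom_get_all_successors activity successors_dict → Spec_get_all_successors activity successors_dict (get_all_successors activity successors_dict)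

-- ===== LEMMAS AND PROOFS =====

-- proof-only helpers: number of universe nodes not yet visited, and the loop potential
def pvu (a : Int) (sd : List (Int × List Int)) (r : List Int) : Nat :=
  ((pvU a sd).toFinset \ r.toFinset).card
def pvPhi (a : Int) (sd : List (Int × List Int)) (r st : List Int) : Nat :=
  st.length + pvu a sd r * pvK sd
def pvStepA (sd : List (Int × List Int)) (f : Nat) : List Int → Int → List Int :=
  fun acc s => if s ∈ acc then acc else pvDfsA sd f acc s

theorem pvSucc_subset (sd : List (Int × List Int)) (n : Int) : ∀ x ∈ pvSucc sd n, x ∈ pvFlat sd := by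
  induction sd with
  | nil => intro x hx; simp [pvSucc, PySem.Dict.getD, PySem.Dict.get?] at hx
  | cons p tl ih =>
    intro x hx
    simp only [pvFlat, List.map_cons, List.flatten_cons, List.mem_append]
    by_cases h : (p.1 == n) = true
    · left
      have e : List.find? (fun q : Int × List Int => q.1 == n) (p :: tl) = some p :=
        List.find?_cons_of_pos h
      simpa [pvSucc, PySem.Dict.getD, PySem.Dict.get?, e] using hx
    · right
      refine ih x ?_
      have e : List.find? (fun q : Int × List Int => q.1 == n) (p :: tl)
          = List.find? (fun q : Int × List Int => q.1 == n) tl :=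
        List.find?_cons_of_neg (by simpa using h)
      simpa [pvSucc, PySem.Dict.getD, PySem.Dict.get?, e] using hx

theorem pvSucc_len (sd : List (Int × List Int)) (n : Int) : (pvSucc sd n).length ≤ (pvFlat sd).length := by
  induction sd with
  | nil => simp [pvSucc, PySem.Dict.getD, PySem.Dict.get?]
  | cons p tl ih =>
    by_cases h : (p.1 == n) = true
    · have e : List.find? (fun q : Int × List Int => q.1 == n) (p :: tl) = some p :=
        List.find?_cons_of_pos h
      simp [pvSucc, PySem.Dict.getD, PySem.Dict.get?, e, pvFlat]
    · have e : List.find? (fun q : Int × List Int => q.1 == n) (p :: tl)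
          = List.find? (fun q : Int × List Int => q.1 == n) tl :=
        List.find?_cons_of_neg (by simpa using h)
      have : (pvSucc ((p :: tl)) n).length = (pvSucc tl n).length := by
        simp [pvSucc, PySem.Dict.getD, PySem.Dict.get?, e]
      rw [this]
      refine le_trans ih ?_
      simp [pvFlat]

theorem pvLoopB_nil (sd : List (Int × List Int)) (f : Nat) (r : List Int) : pvLoopB sd f r [] = r := by
  cases f <;> rfl

theorem pvSet_add_toFinset (r : List Int) (n : Int) :
    (PySem.Set.add r n).toFinset = insert n r.toFinset := by
  by_cases h : n ∈ r
  · have : insert n r.toFinset = r.toFinset := Finset.insert_eq_self.mpr (by simpa using h)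
    simp [PySem.Set.add, PySem.Set.contains, h, this]
  · simp only [PySem.Set.add, PySem.Set.contains]
    rw [if_neg (by simpa using h)]
    ext x
    simp

theorem pvSet_subset_add (r : List Int) (n : Int) : r ⊆ PySem.Set.add r n := by
  unfold PySem.Set.add
  split
  · exact fun x hx => hx
  · exact List.subset_append_left r [n]

theorem pvu_mono (a : Int) (sd : List (Int × List Int)) {r r' : List Int} (h : r ⊆ r') :
    pvu a sd r' ≤ pvu a sd r := by
  unfold pvu
  refine Finset.card_le_card (Finset.sdiff_subset_sdiff (Finset.Subset.refl _) ?_)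
  intro x hx
  simp only [List.mem_toFinset] at hx ⊢
  exact h hx

theorem pvu_add_lt (a : Int) (sd : List (Int × List Int)) {r : List Int} {n : Int}
    (hU : n ∈ pvU a sd) (hr : n ∉ r) : pvu a sd (PySem.Set.add r n) < pvu a sd r := by
  unfold pvu
  refine Finset.card_lt_card ?_
  rw [pvSet_add_toFinset]
  constructor
  · exact Finset.sdiff_subset_sdiff (Finset.Subset.refl _) (Finset.subset_insert _ _)
  · intro hsub
    have h1 : n ∈ (pvU a sd).toFinset \ r.toFinset := by
      simp [List.mem_toFinset, hU, hr]
    have h2 := hsub h1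
    simp [List.mem_toFinset] at h2

theorem pvu_le (a : Int) (sd : List (Int × List Int)) (r : List Int) :
    pvu a sd r ≤ (pvU a sd).length := by
  unfold pvu
  exact le_trans (Finset.card_le_card (Finset.sdiff_subset)) (List.toFinset_card_le _)

theorem pvLoopB_subset (sd : List (Int × List Int)) :
    ∀ (f : Nat) (r st : List Int), r ⊆ pvLoopB sd f r st := by
  intro f
  induction f with
  | zero => intro r st x hx; exact hx
  | succ f ih =>
    intro r st
    cases st with
    | nil => intro x hx; exact hx
    | cons n st =>
      by_cases h : n ∈ r
      · simpa [pvLoopB, h] using ih r st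
      · simpa [pvLoopB, h] using fun x hx => ih (PySem.Set.add r n) (pvSucc sd n ++ st) (pvSet_subset_add r n hx)

-- one unvisited step strictly decreases the potential
theorem pvPhi_step (a : Int) (sd : List (Int × List Int)) {r st : List Int} {n : Int}
    (hU : n ∈ pvU a sd) (hr : n ∉ r) :
    pvPhi a sd (PySem.Set.add r n) (pvSucc sd n ++ st) < pvPhi a sd r (n :: st) := by
  have h1 : pvu a sd (PySem.Set.add r n) < pvu a sd r := pvu_add_lt a sd hU hr
  have h2 : (pvu a sd (PySem.Set.add r n) + 1) * pvK sd ≤ pvu a sd r * pvK sd :=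
    Nat.mul_le_mul_right _ h1
  have h3 : (pvSucc sd n).length + 1 ≤ pvK sd := Nat.succ_le_succ (pvSucc_len sd n)
  have h4 : (pvu a sd (PySem.Set.add r n) + 1) * pvK sd
      = pvu a sd (PySem.Set.add r n) * pvK sd + pvK sd := by ring
  simp only [pvPhi, List.length_append, List.length_cons]
  omega

-- the loop result does not depend on the fuel once the fuel dominates the potential
theorem pvLoopB_fuel (a : Int) (sd : List (Int × List Int)) :
    ∀ (f g : Nat) (r st : List Int), (∀ x ∈ st, x ∈ pvU a sd) →
      pvPhi a sd r st ≤ f → pvPhi a sd r st ≤ g → pvLoopB sd f r st = pvLoopB sd g r st := by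
  intro f
  induction f with
  | zero =>
    intro g r st _ hf _
    have : st = [] := by
      cases st with
      | nil => rfl
      | cons n st => simp [pvPhi] at hf
    subst this
    simp [pvLoopB_nil]
  | succ f ih =>
    intro g r st hU hf hg
    cases st with
    | nil => simp [pvLoopB_nil]
    | cons n st =>
      have hnU : n ∈ pvU a sd := hU n List.mem_cons_self
      have e : pvPhi a sd r (n :: st) = pvPhi a sd r st + 1 := by
        simp only [pvPhi, List.length_cons]; omega
      obtain ⟨g', rfl⟩ : ∃ g', g = g' + 1 := ⟨g - 1, by omega⟩
      by_cases h : n ∈ r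
      · simp only [pvLoopB, if_pos h]
        exact ih g' r st (fun x hx => hU x (List.mem_cons_of_mem _ hx)) (by omega) (by omega)
      · simp only [pvLoopB, if_neg h]
        have hd := pvPhi_step a sd (st := st) hnU h
        refine ih g' (PySem.Set.add r n) (pvSucc sd n ++ st) ?_ (by omega) (by omega)
        intro x hx
        rcases List.mem_append.mp hx with hx | hx
        · exact List.mem_cons_of_mem _ (pvSucc_subset sd n x hx)
        · exact hU x (List.mem_cons_of_mem _ hx)

-- the stack is a continuation: running xs ++ ys = running xs, then ys from the result
theorem pvLoopB_append (a : Int) (sd : List (Int × List Int)) (ys : List Int) (h : Nat) :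
    ∀ (f : Nat) (g : Nat) (r xs : List Int), (∀ x ∈ xs ++ ys, x ∈ pvU a sd) →
      pvPhi a sd r (xs ++ ys) ≤ f → pvPhi a sd r xs ≤ g →
      pvPhi a sd (pvLoopB sd g r xs) ys ≤ h →
      pvLoopB sd f r (xs ++ ys) = pvLoopB sd h (pvLoopB sd g r xs) ys := by
  intro f
  induction f with
  | zero =>
    intro g r xs hU hf hg hh
    have hxs : xs = [] := by
      refine List.length_eq_zero_iff.mp ?_
      simp only [pvPhi, List.length_append] at hf; omega
    have hys : ys = [] := by
      refine List.length_eq_zero_iff.mp ?_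
      simp only [pvPhi, List.length_append] at hf; omega
    subst hxs
    rw [hys]
    simp [pvLoopB_nil]
  | succ f ih =>
    intro g r xs hU hf hg hh
    cases xs with
    | nil =>
      rw [pvLoopB_nil] at hh ⊢
      rw [List.nil_append] at hf hU
      exact pvLoopB_fuel a sd (f + 1) h r ys hU hf hh
    | cons x xs =>
      have hxU : x ∈ pvU a sd := hU x (by simp)
      have e2 : pvPhi a sd r (x :: xs) = pvPhi a sd r xs + 1 := by
        simp only [pvPhi, List.length_cons]; omega
      obtain ⟨g', rfl⟩ : ∃ g', g = g' + 1 := ⟨g - 1, by omega⟩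
      rw [List.cons_append] at hf hU ⊢
      by_cases hx : x ∈ r
      · have eg : pvLoopB sd (g' + 1) r (x :: xs) = pvLoopB sd g' r xs := by
          simp only [pvLoopB, if_pos hx]
        rw [eg] at hh
        simp only [pvLoopB, if_pos hx]
        have e1 : pvPhi a sd r (x :: (xs ++ ys)) = pvPhi a sd r (xs ++ ys) + 1 := by
          simp only [pvPhi, List.length_cons]; omega
        exact ih g' r xs (fun z hz => hU z (List.mem_cons_of_mem _ hz)) (by omega) (by omega) hh
      · have eg : pvLoopB sd (g' + 1) r (x :: xs)
            = pvLoopB sd g' (PySem.Set.add r x) (pvSucc sd x ++ xs) := by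
          simp only [pvLoopB, if_neg hx]
        rw [eg] at hh
        simp only [pvLoopB, if_neg hx]
        rw [← List.append_assoc]
        have hd1 := pvPhi_step a sd (st := xs ++ ys) hxU hx
        have hd2 := pvPhi_step a sd (st := xs) hxU hx
        refine ih g' (PySem.Set.add r x) (pvSucc sd x ++ xs) ?_ ?_ (by omega) hh
        · intro z hz
          rw [List.append_assoc] at hz
          rcases List.mem_append.mp hz with hz | hz
          · exact List.mem_cons_of_mem _ (pvSucc_subset sd x z hz)
          · exact hU z (List.mem_cons_of_mem _ hz)
        · rw [List.append_assoc]
          omega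

-- main simulation: A's successor fold equals B's worklist loop on the same pending list
theorem pvFoldl_eq_loopB (a : Int) (sd : List (Int × List Int)) :
    ∀ (f : Nat) (ss r : List Int) (g : Nat), (∀ x ∈ ss, x ∈ pvU a sd) →
      pvu a sd r ≤ f → pvPhi a sd r ss ≤ g →
      ss.foldl (pvStepA sd f) r = pvLoopB sd g r ss := by
  intro f
  induction f using Nat.strong_induction_on with
  | _ f IHf =>
  intro ss
  induction ss with
  | nil => intro r g _ _ _; simp [pvLoopB_nil]
  | cons s ss IHss =>
    intro r g hU hf hphi
    have hsU : s ∈ pvU a sd := hU s List.mem_cons_self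
    have e : pvPhi a sd r (s :: ss) = pvPhi a sd r ss + 1 := by
      simp only [pvPhi, List.length_cons]; omega
    obtain ⟨g', rfl⟩ : ∃ g', g = g' + 1 := ⟨g - 1, by omega⟩
    by_cases hs : s ∈ r
    · have estep : pvStepA sd f r s = r := by simp [pvStepA, hs]
      rw [List.foldl_cons, estep]
      simp only [pvLoopB, if_pos hs]
      exact IHss r g' (fun x hx => hU x (List.mem_cons_of_mem _ hx)) hf (by omega)
    · have hu1 : 1 ≤ pvu a sd r := by
        refine Finset.card_pos.mpr ⟨s, ?_⟩
        simp only [Finset.mem_sdiff, List.mem_toFinset]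
        exact ⟨hsU, hs⟩
      obtain ⟨f', rfl⟩ : ∃ f', f = f' + 1 := ⟨f - 1, by omega⟩
      have hdlt := pvu_add_lt a sd (r := r) (n := s) hsU hs
      have hdfs : pvDfsA sd (f' + 1) r s
          = pvLoopB sd (pvPhi a sd (PySem.Set.add r s) (pvSucc sd s)) (PySem.Set.add r s) (pvSucc sd s) := by
        show (pvSucc sd s).foldl (pvStepA sd f') (PySem.Set.add r s)
            = pvLoopB sd (pvPhi a sd (PySem.Set.add r s) (pvSucc sd s)) (PySem.Set.add r s) (pvSucc sd s)
        exact IHf f' (by omega) (pvSucc sd s) (PySem.Set.add r s) _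
          (fun x hx => List.mem_cons_of_mem _ (pvSucc_subset sd s x hx)) (by omega) le_rfl
      have estep : pvStepA sd (f' + 1) r s = pvDfsA sd (f' + 1) r s := by
        simp [pvStepA, hs]
      rw [List.foldl_cons, estep, hdfs]
      have hRsub : PySem.Set.add r s
          ⊆ pvLoopB sd (pvPhi a sd (PySem.Set.add r s) (pvSucc sd s)) (PySem.Set.add r s) (pvSucc sd s) :=
        pvLoopB_subset sd _ _ _
      have huR : pvu a sd (pvLoopB sd (pvPhi a sd (PySem.Set.add r s) (pvSucc sd s)) (PySem.Set.add r s) (pvSucc sd s)) ≤ f' + 1 :=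
        le_trans (pvu_mono a sd hRsub) (by omega)
      have hL := IHss (pvLoopB sd (pvPhi a sd (PySem.Set.add r s) (pvSucc sd s)) (PySem.Set.add r s) (pvSucc sd s))
        (pvPhi a sd (pvLoopB sd (pvPhi a sd (PySem.Set.add r s) (pvSucc sd s)) (PySem.Set.add r s) (pvSucc sd s)) ss)
        (fun x hx => hU x (List.mem_cons_of_mem _ hx)) huR le_rfl
      rw [hL]
      simp only [pvLoopB, if_neg hs]
      have hd := pvPhi_step a sd (st := ss) hsU hs
      refine (pvLoopB_append a sd ss _ g' _ (PySem.Set.add r s) (pvSucc sd s) ?_ (by omega) le_rfl le_rfl).symm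
      intro x hx
      rcases List.mem_append.mp hx with hx | hx
      · exact List.mem_cons_of_mem _ (pvSucc_subset sd s x hx)
      · exact hU x (List.mem_cons_of_mem _ hx)

-- ===== VERDICT (by name: the statement is the Claim_ definition above) =====
theorem get_all_successors_spec : Claim_equal_get_all_successors := by
  intro a sd _
  unfold Spec_get_all_successors get_all_successors get_all_successors_alt
  have hadd : PySem.Set.add (PySem.Set.empty : PySem.Set Int) a = [a] := rfl
  have hA : pvDfsA sd ((pvU a sd).length + 1) PySem.Set.empty a
      = (pvSucc sd a).foldl (pvStepA sd (pvU a sd).length) [a] := by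
    show (pvSucc sd a).foldl (pvStepA sd (pvU a sd).length) (PySem.Set.add PySem.Set.empty a)
        = (pvSucc sd a).foldl (pvStepA sd (pvU a sd).length) [a]
    rw [hadd]
  have hB : pvLoopB sd ((pvU a sd).length * pvK sd + 1) PySem.Set.empty [a]
      = pvLoopB sd ((pvU a sd).length * pvK sd) [a] (pvSucc sd a) := by
    have : a ∉ (PySem.Set.empty : PySem.Set Int) := List.not_mem_nil
    simp only [pvLoopB, if_neg this, hadd, List.append_nil]
  rw [hA, hB]
  have hu0 : pvu a sd [a] < pvu a sd [] := by
    have := pvu_add_lt a sd (r := []) (n := a) List.mem_cons_self List.not_mem_nil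
    simpa [hadd] using this
  have hule : pvu a sd [] ≤ (pvU a sd).length := pvu_le a sd []
  have hKs : (pvSucc sd a).length + 1 ≤ pvK sd := Nat.succ_le_succ (pvSucc_len sd a)
  have hmul : (pvu a sd [a] + 1) * pvK sd ≤ (pvU a sd).length * pvK sd :=
    Nat.mul_le_mul_right _ (by omega)
  have hmul' : (pvu a sd [a] + 1) * pvK sd = pvu a sd [a] * pvK sd + pvK sd := by ring
  refine pvFoldl_eq_loopB a sd (pvU a sd).length (pvSucc sd a) [a]
    ((pvU a sd).length * pvK sd)
    (fun x hx => List.mem_cons_of_mem _ (pvSucc_subset sd a x hx)) (by omega) ?_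
  simp only [pvPhi]
  omega
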